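-- pv_equiv track=rewrite | github.com/lairwaves/508-workflows | apps/discord_bot/src/five08/discord_bot/cogs/jobs.py | _paginate_match_lines
-- ===== SOURCE A (Python) =====
-- def _paginate_match_lines(lines: list[str]) -> list[str]:
--     """Paginate long match output lines into Discord-sized messages."""
--     messages: list[str] = []
--     current = ""
--     for line in lines:
--         candidate_block = line + "\n"
--         while len(candidate_block) > 1900:
--             if current:
--                 messages.append(current.rstrip())
--                 current = ""
--             messages.append(candidate_block[:1900].rstrip())
--             candidate_block = candidate_block[1900:]
--         if len(current) + len(candidate_block) > 1900:
--             if current: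
--                 messages.append(current.rstrip())
--             current = candidate_block
--         else:
--             current += candidate_block
--     if current.strip():
--         messages.append(current.rstrip())
--     return messages
-- ===== SOURCE B (Python) =====
-- def _atoms(line):
--     """Split line+'\n' into atoms: (True, chunk) for forced-standalone 1900-char
--     chunks of an over-long line, then (False, remainder) for the mergeable tail."""
--     block = line + "\n"
--     out = []
--     while len(block) > 1900:
--         out.append((True, block[:1900]))
--         block = block[1900:]
--     out.append((False, block))
--     return out
--
--
-- def _paginate_match_lines(lines: list[str]) -> list[str]:
--     """Paginate long match output lines into Discord-sized messages."""
--     atoms = [a for line in lines for a in _atoms(line)]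
--     messages: list[str] = []
--     current = ""
--     for forced, text in atoms:
--         if forced:
--             if current:
--                 messages.append(current.rstrip())
--             current = ""
--             messages.append(text.rstrip())
--         elif len(current) + len(text) > 1900:
--             if current:
--                 messages.append(current.rstrip())
--             current = text
--         else:
--             current += text
--     if current.strip():
--         messages.append(current.rstrip())
--     return messages
-- ===== Notes on version B (the rewrite author's own statement) =====
-- stated objective: alternative
-- what changed: B splits the work into two phases: it first flattens all lines into a flat list of (forced-standalone chunk, mergeable remainder) atoms, then packs them into messages in one separate greedy pass, replacing A's while-loop-inside-for with interleaved flushing.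
import Mathlib
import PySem

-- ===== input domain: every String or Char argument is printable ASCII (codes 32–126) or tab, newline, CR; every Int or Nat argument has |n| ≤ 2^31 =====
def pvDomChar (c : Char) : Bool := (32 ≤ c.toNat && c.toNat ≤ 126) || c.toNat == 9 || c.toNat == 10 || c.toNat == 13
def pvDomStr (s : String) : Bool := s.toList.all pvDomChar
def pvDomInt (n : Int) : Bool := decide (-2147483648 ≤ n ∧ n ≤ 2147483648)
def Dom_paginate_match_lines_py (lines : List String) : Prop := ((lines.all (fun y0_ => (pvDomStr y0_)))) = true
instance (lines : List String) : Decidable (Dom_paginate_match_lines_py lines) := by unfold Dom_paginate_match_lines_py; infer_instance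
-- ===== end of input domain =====

-- B replaces A's interleaved while-inside-for pagination with a two-phase decomposition:
-- first flatten the lines into (forced, text) atoms, then one greedy packing pass; same output.

-- the 1900-char tail shrinks: justifies termination of the while-loop recursions below
theorem pv_slice_len (b : String) (h : 1900 < PySem.Str.len b) :
    (PySem.Str.slice b (some 1900) none).toList.length < b.toList.length := by
  have h' : 1900 < b.toList.length := by
    simp [PySem.Str.len, -String.length_toList] at h; omega
  rw [PySem.Str.toList_slice, PySem.Chars.slice_eq_listSlice,
    PySem.List.slice_from _ (by norm_num : (0:Int) ≤ 1900)]
  rw [List.length_drop]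
  omega

-- ===== PORT A =====
-- A's inner `while len(candidate_block) > 1900` loop (state: messages, current, block)
def pvWhileA (msgs : List String) (cur block : String) : List String × String × String :=
  if 1900 < PySem.Str.len block then
    pvWhileA ((if cur = "" then msgs else msgs ++ [PySem.Str.rstrip cur])
        ++ [PySem.Str.rstrip (PySem.Str.slice block none (some 1900))])
      "" (PySem.Str.slice block (some 1900) none)
  else (msgs, cur, block)
termination_by block.toList.length
decreasing_by exact pv_slice_len _ (by assumption)

-- the code after A's while loop (merge the remaining block into current)
def pvMergeA (st : List String × String × String) : List String × String :=
  if 1900 < PySem.Str.len st.2.1 + PySem.Str.len st.2.2 then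
    ((if st.2.1 = "" then st.1 else st.1 ++ [PySem.Str.rstrip st.2.1]), st.2.2)
  else (st.1, st.2.1 ++ st.2.2)

-- one iteration of A's `for line in lines` loop
def pvStepA (st : List String × String) (line : String) : List String × String :=
  pvMergeA (pvWhileA st.1 st.2 (line ++ "\n"))

def paginate_match_lines_py (lines : List String) : List String :=
  let st := lines.foldl pvStepA ([], "")
  if PySem.Str.strip st.2 = "" then st.1 else st.1 ++ [PySem.Str.rstrip st.2]

-- ===== PORT B =====
-- Source B's _atoms while loop: forced 1900-char chunks, then the mergeable remainder
def pvAtoms (block : String) : List (Bool × String) :=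
  if 1900 < PySem.Str.len block then
    (true, PySem.Str.slice block none (some 1900))
      :: pvAtoms (PySem.Str.slice block (some 1900) none)
  else [(false, block)]
termination_by block.toList.length
decreasing_by exact pv_slice_len _ (by assumption)

-- one iteration of Source B's packing loop over atoms
def pvPack (st : List String × String) (a : Bool × String) : List String × String :=
  if a.1 then
    ((if st.2 = "" then st.1 else st.1 ++ [PySem.Str.rstrip st.2]) ++ [PySem.Str.rstrip a.2], "")
  else if 1900 < PySem.Str.len st.2 + PySem.Str.len a.2 then
    ((if st.2 = "" then st.1 else st.1 ++ [PySem.Str.rstrip st.2]), a.2)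
  else (st.1, st.2 ++ a.2)

def paginate_match_lines_py_alt (lines : List String) : List String :=
  let atoms := lines.flatMap (fun line => pvAtoms (line ++ "\n"))
  let st := atoms.foldl pvPack ([], "")
  if PySem.Str.strip st.2 = "" then st.1 else st.1 ++ [PySem.Str.rstrip st.2]

-- ===== PRECONDITION & SPEC =====
def Spec_paginate_match_lines_py (lines : List String) (out : List String) : Prop := out = paginate_match_lines_py_alt lines
instance (lines : List String) (out : List String) : Decidable (Spec_paginate_match_lines_py lines out) := by unfold Spec_paginate_match_lines_py; infer_instance

-- ===== CLAIM (what is proved, stated in full; the proofs are below) =====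
def Claim_equal_paginate_match_lines_py : Prop := ∀ (lines : List String), Dom_paginate_match_lines_py lines → Spec_paginate_match_lines_py lines (paginate_match_lines_py lines)

-- ===== LEMMAS AND PROOFS =====

-- A's while loop followed by its merge step = B's packing fold over the atoms of the block
theorem pv_while_eq_pack (block : String) : ∀ (msgs : List String) (cur : String),
    pvMergeA (pvWhileA msgs cur block) = List.foldl pvPack (msgs, cur) (pvAtoms block) := by
  fun_induction pvAtoms block with
  | case1 block h ih =>
    intro msgs cur
    rw [pvWhileA, if_pos h]
    rw [List.foldl_cons]
    rw [ih]
    simp [pvPack]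
  | case2 block h =>
    intro msgs cur
    rw [pvWhileA, if_neg h]
    simp [pvMergeA, pvPack]

theorem pv_foldl_eq (lines : List String) : ∀ (st : List String × String),
    lines.foldl pvStepA st
      = (lines.flatMap (fun line => pvAtoms (line ++ "\n"))).foldl pvPack st := by
  induction lines with
  | nil => intro st; rfl
  | cons l ls ih =>
    intro st
    rw [List.flatMap_cons, List.foldl_append, List.foldl_cons, ih]
    congr 1
    calc pvStepA st l = pvMergeA (pvWhileA st.1 st.2 (l ++ "\n")) := rfl
      _ = List.foldl pvPack (st.1, st.2) (pvAtoms (l ++ "\n")) := pv_while_eq_pack _ _ _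
      _ = List.foldl pvPack st (pvAtoms (l ++ "\n")) := by rfl

-- ===== VERDICT (by name: the statement is the Claim_ definition above) =====
theorem paginate_match_lines_py_spec : Claim_equal_paginate_match_lines_py := by
  intro lines _
  unfold Spec_paginate_match_lines_py paginate_match_lines_py paginate_match_lines_py_alt
  rw [pv_foldl_eq]
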